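-- pv_equiv track=rewrite | github.com/zfifteen/z-band-prime-prefilter | benchmarks/python/prime_inference_generator/boundary_certificate_graph_abstention_analysis.py | true_boundary_status
-- ===== SOURCE A (Python) =====
-- from typing import Any
--
-- def true_boundary_status(
--     actual_offset: int | None,
--     graph_row: dict[str, Any],
-- ) -> str:
--     """Return the true-boundary status after graph solving."""
--     if actual_offset is None:
--         return "NOT_IN_CANDIDATE_SET"
--     candidate_offsets = [int(offset) for offset in graph_row["candidate_offsets"]]
--     if actual_offset not in candidate_offsets:
--         return "NOT_IN_CANDIDATE_SET"
--     absorbed = [int(offset) for offset in graph_row["absorbed_offsets"]]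
--     if actual_offset in absorbed:
--         return "ABSORBED"
--     resolved = [int(offset) for offset in graph_row["resolved_offsets_after_solve"]]
--     if actual_offset in resolved:
--         return "RESOLVED"
--     unresolved = [
--         int(offset) for offset in graph_row["unresolved_offsets_after_solve"]
--     ]
--     if actual_offset in unresolved:
--         return "UNRESOLVED"
--     rejected = [int(offset) for offset in graph_row["rejected_offsets"]]
--     if actual_offset in rejected:
--         return "REJECTED"
--     return "NOT_IN_CANDIDATE_SET"
-- ===== SOURCE B (Python) =====
-- def true_boundary_status(actual_offset, graph_row):
--     """Return the true-boundary status after graph solving."""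
--     if actual_offset is None:
--         return "NOT_IN_CANDIDATE_SET"
--     if actual_offset not in [int(o) for o in graph_row["candidate_offsets"]]:
--         return "NOT_IN_CANDIDATE_SET"
--     # Build an offset -> status index in reverse priority order (higher-priority
--     # categories overwrite lower-priority ones), then answer with one lookup.
--     status = {}
--     for key, label in (
--         ("rejected_offsets", "REJECTED"),
--         ("unresolved_offsets_after_solve", "UNRESOLVED"),
--         ("resolved_offsets_after_solve", "RESOLVED"),
--         ("absorbed_offsets", "ABSORBED"),
--     ):
--         for o in graph_row.get(key, ()):
--             status[int(o)] = label
--     return status.get(actual_offset, "NOT_IN_CANDIDATE_SET")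
-- ===== Notes on version B (the rewrite author's own statement) =====
-- stated objective: alternative
-- what changed: Instead of testing the offset against each category list in a five-way branch chain, B builds a single offset->status dictionary by scanning the four category lists once in reverse priority order (higher-priority overwrites) and answers with one dictionary lookup after the candidate-set check.
import Mathlib
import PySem

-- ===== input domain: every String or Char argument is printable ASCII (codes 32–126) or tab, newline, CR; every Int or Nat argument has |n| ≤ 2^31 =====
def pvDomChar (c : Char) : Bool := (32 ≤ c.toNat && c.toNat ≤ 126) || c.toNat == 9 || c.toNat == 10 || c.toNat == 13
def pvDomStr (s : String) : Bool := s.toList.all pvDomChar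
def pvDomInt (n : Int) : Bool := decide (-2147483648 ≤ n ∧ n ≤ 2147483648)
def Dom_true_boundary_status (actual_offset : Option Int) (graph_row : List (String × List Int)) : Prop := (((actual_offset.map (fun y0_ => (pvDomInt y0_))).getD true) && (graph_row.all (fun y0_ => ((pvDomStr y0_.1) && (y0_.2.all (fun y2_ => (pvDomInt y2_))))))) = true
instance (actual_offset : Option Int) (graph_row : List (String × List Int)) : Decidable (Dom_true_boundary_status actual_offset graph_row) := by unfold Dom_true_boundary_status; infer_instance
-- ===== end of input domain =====

-- B replaces A's five-way lazy branch chain by a reverse-priority offset->status dictionary built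
-- in one scan of the category lists, answered by a single lookup; return value only, no side effects.

-- ===== PORT A =====
-- graph_row[k] is a first-match association-list lookup; a missing key is a KeyError in
-- Python (excluded by Pre_), ported as getD [] here. int(offset) on an int is the identity,
-- ported as `.map (fun o => o)`.
def true_boundary_status (actual_offset : Option Int) (graph_row : List (String × List Int)) : String :=
  match actual_offset with
  | none => "NOT_IN_CANDIDATE_SET"
  | some x =>
    let candidate_offsets := ((graph_row.lookup "candidate_offsets").getD []).map (fun o => o)
    if ¬ candidate_offsets.contains x then "NOT_IN_CANDIDATE_SET"
    else
      let absorbed := ((graph_row.lookup "absorbed_offsets").getD []).map (fun o => o)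
      if absorbed.contains x then "ABSORBED"
      else
        let resolved := ((graph_row.lookup "resolved_offsets_after_solve").getD []).map (fun o => o)
        if resolved.contains x then "RESOLVED"
        else
          let unresolved := ((graph_row.lookup "unresolved_offsets_after_solve").getD []).map (fun o => o)
          if unresolved.contains x then "UNRESOLVED"
          else
            let rejected := ((graph_row.lookup "rejected_offsets").getD []).map (fun o => o)
            if rejected.contains x then "REJECTED"
            else "NOT_IN_CANDIDATE_SET"

-- ===== PORT B =====
-- the reverse-priority (key, label) table of Source B
def tbsTable : List (String × String) :=
  [("rejected_offsets", "REJECTED"),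
   ("unresolved_offsets_after_solve", "UNRESOLVED"),
   ("resolved_offsets_after_solve", "RESOLVED"),
   ("absorbed_offsets", "ABSORBED")]

-- graph_row["candidate_offsets"] is a first-match lookup (missing key = KeyError, outside
-- Pre_), ported as getD []; graph_row.get(key, ()) is the same lookup with an empty default.
def true_boundary_status_alt (actual_offset : Option Int) (graph_row : List (String × List Int)) : String :=
  match actual_offset with
  | none => "NOT_IN_CANDIDATE_SET"
  | some x =>
    if ¬ ((((graph_row.lookup "candidate_offsets").getD []).map (fun o => o)).contains x) then
      "NOT_IN_CANDIDATE_SET"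
    else
      let status : PySem.Dict Int String :=
        tbsTable.foldl
          (fun d kl => ((graph_row.lookup kl.1).getD []).foldl (fun d o => d.insert o kl.2) d)
          PySem.Dict.empty
      status.getD x "NOT_IN_CANDIDATE_SET"

-- ===== PRECONDITION & SPEC =====
-- Pre_ excludes exactly the inputs where A raises KeyError: a key must be present only when
-- A's lazy evaluation actually reads it (candidate_offsets only for a non-None offset, the
-- later lists only while the offset was in every earlier check's path).
def Pre_true_boundary_status (actual_offset : Option Int) (graph_row : List (String × List Int)) : Prop :=
  actual_offset = none ∨
    ((graph_row.lookup "candidate_offsets").isSome = true ∧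
      (actual_offset.getD 0 ∈ (graph_row.lookup "candidate_offsets").getD [] →
        (graph_row.lookup "absorbed_offsets").isSome = true ∧
          (actual_offset.getD 0 ∉ (graph_row.lookup "absorbed_offsets").getD [] →
            (graph_row.lookup "resolved_offsets_after_solve").isSome = true ∧
              (actual_offset.getD 0 ∉ (graph_row.lookup "resolved_offsets_after_solve").getD [] →
                (graph_row.lookup "unresolved_offsets_after_solve").isSome = true ∧
                  (actual_offset.getD 0 ∉ (graph_row.lookup "unresolved_offsets_after_solve").getD [] →
                    (graph_row.lookup "rejected_offsets").isSome = true)))))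
instance (actual_offset : Option Int) (graph_row : List (String × List Int)) : Decidable (Pre_true_boundary_status actual_offset graph_row) := by unfold Pre_true_boundary_status; infer_instance

def pvWitness_true_boundary_status : Option Int × (List (String × List Int)) :=
  (some 3, [("candidate_offsets", [3, 5]), ("absorbed_offsets", []), ("resolved_offsets_after_solve", [3]),
            ("unresolved_offsets_after_solve", []), ("rejected_offsets", [])])

def Spec_true_boundary_status (actual_offset : Option Int) (graph_row : List (String × List Int)) (out : String) : Prop := out = true_boundary_status_alt actual_offset graph_row
instance (actual_offset : Option Int) (graph_row : List (String × List Int)) (out : String) : Decidable (Spec_true_boundary_status actual_offset graph_row out) := by unfold Spec_true_boundary_status; infer_instance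

-- ===== CLAIM (what is proved, stated in full; the proofs are below) =====
def Claim_equal_true_boundary_status : Prop := ∀ (actual_offset : Option Int) (graph_row : List (String × List Int)), Dom_true_boundary_status actual_offset graph_row → Pre_true_boundary_status actual_offset graph_row → Spec_true_boundary_status actual_offset graph_row (true_boundary_status actual_offset graph_row)


-- ===== LEMMAS AND PROOFS =====

-- inserting a constant label for every element of a list: the lookup sees the label iff x ∈ l
theorem tbs_getD_foldl_insert_const (l : List Int) (lab : String) (d : PySem.Dict Int String)
    (x : Int) (df : String) :
    (l.foldl (fun d o => d.insert o lab) d).getD x df = if x ∈ l then lab else d.getD x df := by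
  induction l generalizing d with
  | nil => simp
  | cons a t ih =>
    simp only [List.foldl_cons, ih, List.mem_cons, PySem.Dict.getD_insert]
    by_cases hxt : x ∈ t <;> by_cases hxa : x = a <;> simp [hxt, hxa]

-- ===== VERDICT (by name: the statement is the Claim_ definition above) =====
theorem true_boundary_status_spec : Claim_equal_true_boundary_status := by
  intro actual_offset graph_row _ hpre
  unfold Spec_true_boundary_status true_boundary_status true_boundary_status_alt
  cases actual_offset with
  | none => rfl
  | some x =>
    simp only [tbsTable, List.foldl_cons, List.foldl_nil, List.map_id',
      tbs_getD_foldl_insert_const, List.contains_eq_mem, decide_eq_true_eq]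
    rcases hpre with h | ⟨_, hchain⟩
    · exact absurd h (by simp)
    by_cases hc : x ∈ (graph_row.lookup "candidate_offsets").getD []
    · obtain ⟨_, hchain⟩ := hchain hc
      by_cases ha : x ∈ (graph_row.lookup "absorbed_offsets").getD []
      · simp [hc, ha]
      obtain ⟨_, hchain⟩ := hchain ha
      by_cases hr : x ∈ (graph_row.lookup "resolved_offsets_after_solve").getD []
      · simp [hc, ha, hr]
      obtain ⟨_, hchain⟩ := hchain hr
      by_cases hu : x ∈ (graph_row.lookup "unresolved_offsets_after_solve").getD []
      · simp [hc, ha, hr, hu]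
      by_cases hj : x ∈ (graph_row.lookup "rejected_offsets").getD [] <;>
        simp [hc, ha, hr, hu, hj, PySem.Dict.getD_empty]
    · simp [hc]
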